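-- pv_equiv track=rewrite | github.com/hongdeyuan/javascript_fullstack | Me/python/zip_password.py | dict_builder
-- ===== SOURCE A (Python) =====
-- g_minlength = 6    # 最小长度
--
-- g_maxlength = 6    # 最大长度
--
-- g_chars = [
--     '0', '1', '2', '3', '4', '5', '6', '7', '8', '9',
--     'a', 'b', 'c', 'd', 'e', 'f', 'g', 'h', 'i', 'j', 'k', 'l', 'm', 'n', 'o', 'p', 'q', 'r', 's', 't', 'u', 'v','w', 'x', 'y', 'z',
--     'A', 'B', 'C', 'D', 'E', 'F', 'G', 'H', 'I', 'J', 'K', 'L', 'M', 'N', 'O', 'P', 'Q', 'R', 'S', 'T', 'U', 'V','W', 'X', 'Y', 'Z',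
--     '.', '#'
-- ]
--
-- def dict_builder(startnum=0, endnum= None, minlength=g_minlength, maxlength=g_maxlength, chars = g_chars):
--
--     base = len(chars) ** (minlength-1)
--     end = len(chars) ** maxlength
--     if startnum > base:
--         base = startnum
--     if endnum is not None and endnum<end:
--         end = endnum
--     start = base
--     def get_char(num):
--         if num < len(chars):
--             return chars[num]
--         else:
--             return get_char(num // len(chars)) + chars[num % len(chars)]
--
--     for i in range(start, end):
--         yield i, get_char(i)
-- ===== SOURCE B (Python) =====
-- g_minlength = 6    # minimum length
--
-- g_maxlength = 6    # maximum length
--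
-- g_chars = [
--     '0', '1', '2', '3', '4', '5', '6', '7', '8', '9',
--     'a', 'b', 'c', 'd', 'e', 'f', 'g', 'h', 'i', 'j', 'k', 'l', 'm', 'n', 'o', 'p', 'q', 'r', 's', 't', 'u', 'v','w', 'x', 'y', 'z',
--     'A', 'B', 'C', 'D', 'E', 'F', 'G', 'H', 'I', 'J', 'K', 'L', 'M', 'N', 'O', 'P', 'Q', 'R', 'S', 'T', 'U', 'V','W', 'X', 'Y', 'Z',
--     '.', '#'
-- ]
--
-- def dict_builder(startnum=0, endnum=None, minlength=g_minlength, maxlength=g_maxlength, chars=g_chars):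
--     # Incremental odometer: convert the start number to its digit list once, then
--     # increment digits and character cells in place instead of re-deriving every
--     # digit of each number by recursive division (A's get_char).
--     n = len(chars)
--     start = max(startnum, n ** (minlength - 1))
--     end = n ** maxlength if endnum is None else min(endnum, n ** maxlength)
--     if end <= start:
--         return
--     digits = []            # digits of start, least-significant first
--     num = start
--     while num >= n:
--         digits.append(num % n)
--         num //= n
--     digits.append(num)
--     cells = [chars[d] for d in reversed(digits)]   # character cells, most-significant first
--     for i in range(start, end):
--         yield i, ''.join(cells)
--         j = 0              # odometer increment with carry
--         while True:
--             if j == len(digits):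
--                 digits.append(1)
--                 cells.insert(0, chars[1])
--                 break
--             digits[j] += 1
--             if digits[j] < n:
--                 cells[-1 - j] = chars[digits[j]]
--                 break
--             digits[j] = 0
--             cells[-1 - j] = chars[0]
--             j += 1
-- ===== Notes on version B (the rewrite author's own statement) =====
-- stated objective: alternative
-- what changed: A re-derives every digit of each number with a recursive base-conversion (get_char) that rebuilds the string by repeated division and concatenation; B converts the start number once and then keeps a digit odometer plus its character cells, incremented in place with amortized O(1) carries per emitted number.
-- outside the precondition, e.g. on dict_builder(0, 0, 6, -1, ['a', 'b']): A returns [], B returns []; on dict_builder(0, 0, 6, -2000, ['a', 'b']): A raises TypeError, B returns []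
import Mathlib
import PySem

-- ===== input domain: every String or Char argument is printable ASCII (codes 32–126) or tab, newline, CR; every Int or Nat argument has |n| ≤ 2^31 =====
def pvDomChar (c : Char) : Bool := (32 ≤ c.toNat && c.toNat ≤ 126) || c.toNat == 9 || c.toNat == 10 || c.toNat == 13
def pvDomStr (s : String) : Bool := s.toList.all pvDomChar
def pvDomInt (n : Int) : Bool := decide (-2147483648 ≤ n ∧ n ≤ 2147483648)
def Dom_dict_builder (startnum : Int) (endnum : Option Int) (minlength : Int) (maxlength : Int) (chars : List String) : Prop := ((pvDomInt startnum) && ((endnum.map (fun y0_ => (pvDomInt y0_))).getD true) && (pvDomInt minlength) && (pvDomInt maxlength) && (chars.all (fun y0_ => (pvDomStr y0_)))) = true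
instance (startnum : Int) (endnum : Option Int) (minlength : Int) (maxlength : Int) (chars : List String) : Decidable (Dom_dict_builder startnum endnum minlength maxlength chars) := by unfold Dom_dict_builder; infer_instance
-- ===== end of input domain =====

-- B replaces A's per-number recursive base-conversion by a digit odometer that is
-- incremented in place (objective: alternative algorithm, same cost).  A and B are
-- Python generators; the equivalence is about the list of yielded pairs.

-- ===== PORT A =====
-- get_char(num): under Pre_ every call has 0 ≤ num, so the Nat argument is exact.
-- The chars.length < 2 guard is for totality only: Python hits ZeroDivisionError
-- (len 0) or RecursionError (len 1) if that code is reached, and under Pre_ the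
-- generator body never reaches it.
def pvGetChar (chars : List String) (num : Nat) : String :=
  if _h0 : chars.length < 2 then ""
  else if _h1 : num < chars.length then PySem.List.pyGetD chars (num : Int) ""
  else String.ofList ((pvGetChar chars (num / chars.length)).toList
        ++ (PySem.List.pyGetD chars ((num % chars.length : Nat) : Int) "").toList)
termination_by num
decreasing_by exact Nat.div_lt_self (by omega) (by omega)

-- len(chars) ** (minlength-1) and ** maxlength: an int in Python exactly when the
-- exponent is ≥ 0, hence the `1 ≤ minlength` / `0 ≤ maxlength` branches.  On a
-- negative exponent Python's power is a FLOAT in (0, 1] (or 0.0 after underflow, or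
-- ZeroDivisionError for len 0): then `startnum > base` holds iff 1 ≤ startnum
-- (len ≥ 2) resp. 2 ≤ startnum (len = 1) and base becomes the int startnum — exactly
-- the inputs Pre_ admits in that branch, so `else startnum` is exact on Pre_;
-- likewise `endnum < end` holds on Pre_'s `endnum ≤ -1` and end becomes that int
-- (`else endnum.getD 0` is only reached on Pre_-admitted inputs with endnum = some).
-- If a float base/end survives to range(), Python raises TypeError: outside Pre_.
def dict_builder (startnum : Int) (endnum : Option Int) (minlength : Int) (maxlength : Int) (chars : List String) : List (Int × String) :=
  let base : Int :=
    if 1 ≤ minlength then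
      (if startnum > (chars.length : Int) ^ (minlength - 1).toNat then startnum
       else (chars.length : Int) ^ (minlength - 1).toNat)
    else startnum
  let endv : Int :=
    if 0 ≤ maxlength then
      (match endnum with
       | some e => if e < (chars.length : Int) ^ maxlength.toNat then e
                   else (chars.length : Int) ^ maxlength.toNat
       | none => (chars.length : Int) ^ maxlength.toNat)
    else endnum.getD 0
  -- for i in range(base, endv): yield i, get_char(i)   (i ≥ 0 under Pre_ whenever nonempty)
  (PySem.List.pyRange base endv 1).map (fun i => (i, pvGetChar chars i.toNat))

-- ===== PORT B =====
-- chars[d] for 0 ≤ d (how Source B reads a cell)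
def pvCell (chars : List String) (d : Nat) : String := PySem.List.pyGetD chars (d : Int) ""

-- digits of num, least-significant first (Source B's first while-loop); the 2 ≤ n conjunct
-- is for totality only (Python's loop never ends for n ≤ 1; under Pre_, Source B builds
-- digits only when the range is nonempty, which forces 2 ≤ n).
def pvToDigits (n num : Nat) : List Nat :=
  if _h : n ≤ num ∧ 2 ≤ n then (num % n) :: pvToDigits n (num / n) else [num]
termination_by num
decreasing_by exact Nat.div_lt_self (by omega) (by omega)

-- odometer increment with carry (Source B's inner `while True` loop), acting on the digit
-- list and the cell list together.  Python's `cells` is most-significant first and is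
-- written at index -1-j; this port stores it REVERSED (least-significant first, aligned
-- with digits), so that write is the head of the recursion; pvRender reverses it back
-- before joining.
def pvIncr (chars : List String) (n : Nat) : List Nat → List String → List Nat × List String
  | [], cs => ([1], cs ++ [pvCell chars 1])
  | d :: ds, cs =>
      if d + 1 < n then ((d + 1) :: ds, pvCell chars (d + 1) :: cs.tail)
      else (0 :: (pvIncr chars n ds cs.tail).1, pvCell chars 0 :: (pvIncr chars n ds cs.tail).2)

-- ''.join(cells)  (cs is the reversed cells, see above)
def pvRender (cs : List String) : String := PySem.Str.join "" cs.reverse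

-- for i in range(start, endv): yield i, ''.join(cells); increment the odometer
def pvLoop (chars : List String) (n : Nat) (i endv : Int) (ds : List Nat) (cs : List String) : List (Int × String) :=
  if _h : i < endv then
    (i, pvRender cs) :: pvLoop chars n (i + 1) endv (pvIncr chars n ds cs).1 (pvIncr chars n ds cs).2
  else []
termination_by (endv - i).toNat
decreasing_by omega

-- prologue is Source B's, which mirrors A's; negative exponents modelled exactly as in
-- port A above (exact on Pre_ for the same reasons)
def dict_builder_alt (startnum : Int) (endnum : Option Int) (minlength : Int) (maxlength : Int) (chars : List String) : List (Int × String) :=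
  let n : Nat := chars.length
  let start : Int :=
    if 1 ≤ minlength then max startnum ((n : Int) ^ (minlength - 1).toNat) else startnum
  let endv : Int :=
    if 0 ≤ maxlength then
      (match endnum with
       | some e => min e ((n : Int) ^ maxlength.toNat)
       | none => (n : Int) ^ maxlength.toNat)
    else endnum.getD 0
  if endv ≤ start then []
  else
    -- digits of start (least-significant first) and the matching character cells
    let ds := pvToDigits n start.toNat
    pvLoop chars n start endv ds (ds.map (pvCell chars))

-- ===== PRECONDITION & SPEC =====
-- Pre_ admits exactly the inputs on which A returns (a list of pairs), except that it
-- also excludes endnum = 0 with maxlength < 0: there A's comparison `endnum < end`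
-- against the float len(chars)**maxlength returns [] for moderate maxlength but raises
-- TypeError once the float underflows to exactly 0.0 (e.g. maxlength = -2000), a
-- boundary that is not a fact about the integers involved; B's min() keeps the int 0 and
-- returns [] on that whole slice (agreeing with A wherever A does not raise).
-- Excluded raising inputs: a float base/end surviving to range() (TypeError), empty
-- chars with a nonempty range or a negative exponent (ZeroDivisionError), a single
-- char with a nonempty range (RecursionError).
def Pre_dict_builder (startnum : Int) (endnum : Option Int) (minlength : Int) (maxlength : Int) (chars : List String) : Prop :=
  let n : Int := (chars.length : Int)
  let s : Int := if 1 ≤ minlength then max startnum (n ^ (minlength - 1).toNat) else startnum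
  let e : Int := if 0 ≤ maxlength then
      (match endnum with
       | some ev => min ev (n ^ maxlength.toNat)
       | none => n ^ maxlength.toNat)
    else endnum.getD 0
  (1 ≤ minlength ∨ (2 ≤ n ∧ 1 ≤ startnum) ∨ (n = 1 ∧ 2 ≤ startnum))
  ∧ (0 ≤ maxlength ∨ (1 ≤ n ∧ endnum.getD 0 ≤ -1))
  ∧ (n ≤ 1 → e ≤ s)
instance (startnum : Int) (endnum : Option Int) (minlength : Int) (maxlength : Int) (chars : List String) : Decidable (Pre_dict_builder startnum endnum minlength maxlength chars) := by unfold Pre_dict_builder; infer_instance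

def pvWitness_dict_builder : Int × Option Int × Int × Int × List String := (0, none, 1, 1, ["a", "b"])

def Spec_dict_builder (startnum : Int) (endnum : Option Int) (minlength : Int) (maxlength : Int) (chars : List String) (out : List (Int × String)) : Prop := out = dict_builder_alt startnum endnum minlength maxlength chars
instance (startnum : Int) (endnum : Option Int) (minlength : Int) (maxlength : Int) (chars : List String) (out : List (Int × String)) : Decidable (Spec_dict_builder startnum endnum minlength maxlength chars out) := by unfold Spec_dict_builder; infer_instance

-- ===== CLAIM (what is proved, stated in full; the proofs are below) =====
def Claim_equal_dict_builder : Prop := ∀ (startnum : Int) (endnum : Option Int) (minlength : Int) (maxlength : Int) (chars : List String), Dom_dict_builder startnum endnum minlength maxlength chars → Pre_dict_builder startnum endnum minlength maxlength chars → Spec_dict_builder startnum endnum minlength maxlength chars (dict_builder startnum endnum minlength maxlength chars)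

-- ===== LEMMAS AND PROOFS =====

theorem pv_join_empty_flatten (l : List String) :
    (PySem.Str.join "" l).toList = (l.map String.toList).flatten := by
  rw [PySem.Str.toList_join]
  induction l with
  | nil => simp [PySem.Chars.join_nil]
  | cons p rest ih =>
    cases rest with
    | nil => simp [PySem.Chars.join_singleton]
    | cons q r =>
      simp only [List.map_cons] at ih ⊢
      rw [PySem.Chars.join_cons_cons]
      simp only [List.flatten_cons]
      rw [ih]
      simp

-- the cell list follows the digit list through pvIncr
theorem pv_incr_map (chars : List String) (n : Nat) (ds : List Nat) (cs : List String)
    (h : cs = ds.map (pvCell chars)) :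
    pvIncr chars n ds cs =
      ((pvIncr chars n ds cs).1, (pvIncr chars n ds cs).1.map (pvCell chars)) := by
  induction ds generalizing cs with
  | nil => subst h; simp [pvIncr]
  | cons d ds ih =>
    subst h
    simp only [pvIncr, List.map_cons, List.tail_cons]
    split
    · simp
    · have := ih (ds.map (pvCell chars)) rfl
      simp only [Prod.ext_iff] at this ⊢
      simp [this.2]

theorem pvToDigits_ge (n num : Nat) (hn : 2 ≤ n) (hb : n ≤ num) :
    pvToDigits n num = (num % n) :: pvToDigits n (num / n) := by
  rw [pvToDigits]; exact dif_pos (And.intro hb hn)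

theorem pvToDigits_lt (n num : Nat) (hb : num < n) : pvToDigits n num = [num] := by
  rw [pvToDigits]; exact dif_neg (by omega)

-- the digit component of pvIncr is +1 in base n
theorem pv_incr_toDigits (n : Nat) (hn : 2 ≤ n) (num : Nat) (cs : List String) (chars : List String) :
    (pvIncr chars n (pvToDigits n num) cs).1 = pvToDigits n (num + 1) := by
  induction num using Nat.strong_induction_on generalizing cs with
  | _ num ih =>
    by_cases hb : n ≤ num
    · rw [pvToDigits_ge n num hn hb]
      by_cases hr : num % n + 1 < n
      · simp only [pvIncr, if_pos hr]
        have hmod : (num + 1) % n = num % n + 1 := by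
          conv_lhs => rw [← Nat.div_add_mod num n]
          rw [Nat.add_assoc, Nat.mul_add_mod]
          exact Nat.mod_eq_of_lt hr
        have hdiv : (num + 1) / n = num / n := by
          conv_lhs => rw [← Nat.div_add_mod num n]
          rw [Nat.add_assoc, Nat.mul_add_div (by omega)]
          have : (num % n + 1) / n = 0 := Nat.div_eq_of_lt hr
          omega
        rw [pvToDigits_ge n (num + 1) hn (by omega), hmod, hdiv]
      · simp only [pvIncr, if_neg hr]
        have hr' : num % n + 1 = n := by have := Nat.mod_lt num (show 0 < n by omega); omega
        have hmod : (num + 1) % n = 0 := by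
          conv_lhs => rw [← Nat.div_add_mod num n]
          rw [Nat.add_assoc, hr', Nat.mul_add_mod]
          simp
        have hdiv : (num + 1) / n = num / n + 1 := by
          conv_lhs => rw [← Nat.div_add_mod num n]
          rw [Nat.add_assoc, hr', Nat.mul_add_div (by omega)]
          simp [Nat.div_self (show 0 < n by omega)]
        rw [pvToDigits_ge n (num + 1) hn (by omega), hmod, hdiv]
        simp only [List.cons.injEq, true_and]
        exact ih (num / n) (Nat.div_lt_self (by omega) (by omega)) _
    · rw [pvToDigits_lt n num (by omega)]
      by_cases hlt : num + 1 < n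
      · simp only [pvIncr, if_pos hlt]
        rw [pvToDigits_lt n (num + 1) hlt]
      · simp only [pvIncr, if_neg hlt]
        have he : num + 1 = n := by omega
        rw [pvToDigits_ge n (num + 1) hn (by omega), he, Nat.mod_self, Nat.div_self (by omega),
          pvToDigits_lt n 1 (by omega)]

theorem pvGetChar_lt (chars : List String) (num : Nat) (hn : 2 ≤ chars.length) (h : num < chars.length) :
    pvGetChar chars num = pvCell chars num := by
  rw [pvGetChar, dif_neg (by omega), dif_pos h]; rfl

theorem pvGetChar_ge (chars : List String) (num : Nat) (hn : 2 ≤ chars.length) (h : chars.length ≤ num) :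
    pvGetChar chars num = String.ofList ((pvGetChar chars (num / chars.length)).toList
        ++ (pvCell chars (num % chars.length)).toList) := by
  rw [pvGetChar, dif_neg (by omega), dif_neg (by omega)]; rfl

-- rendering the digit cells of num is A's get_char(num)
theorem pv_render_getChar (chars : List String) (hn : 2 ≤ chars.length) (num : Nat) :
    pvRender ((pvToDigits chars.length num).map (pvCell chars)) = pvGetChar chars num := by
  induction num using Nat.strong_induction_on with
  | _ num ih =>
    by_cases hb : chars.length ≤ num
    · rw [pvToDigits_ge chars.length num hn hb, pvGetChar_ge chars num hn hb]
      apply String.toList_inj.mp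
      simp only [pvRender, pv_join_empty_flatten, String.toList_ofList]
      simp only [List.map_cons, List.reverse_cons, List.map_append, List.flatten_append]
      have := ih (num / chars.length) (Nat.div_lt_self (by omega) (by omega))
      rw [← this]
      simp only [pvRender, pv_join_empty_flatten]
      simp
    · rw [pvToDigits_lt chars.length num (by omega), pvGetChar_lt chars num hn (by omega)]
      apply String.toList_inj.mp
      simp only [pvRender, pv_join_empty_flatten]
      simp

-- the main loop invariant: B's loop from i with the digits/cells of i is A's map
theorem pv_loop_eq (chars : List String) (hn : 2 ≤ chars.length) (e : Int) (i : Int) (hi : 0 ≤ i) :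
    pvLoop chars chars.length i e (pvToDigits chars.length i.toNat)
        ((pvToDigits chars.length i.toNat).map (pvCell chars)) =
      (PySem.List.pyRange i e 1).map (fun j => (j, pvGetChar chars j.toNat)) := by
  generalize hk : (e - i).toNat = k
  induction k generalizing i with
  | zero =>
    rw [pvLoop, dif_neg (by omega)]
    rw [PySem.List.pyRange_one]
    have : (e - i).toNat = 0 := hk
    simp [this]
  | succ k ih =>
    have hlt : i < e := by omega
    rw [pvLoop, dif_pos hlt]
    rw [PySem.List.pyRange_one_cons hlt]
    simp only [List.map_cons]
    congr 1
    · rw [pv_render_getChar chars hn i.toNat]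
    · rw [pv_incr_map chars chars.length _ _ rfl]
      simp only
      rw [pv_incr_toDigits chars.length hn i.toNat _ chars]
      have harg : i.toNat + 1 = (i + 1).toNat := by omega
      rw [harg]
      exact ih (i + 1) (by omega) (by omega)

theorem pv_base_eq (n startnum minlength : Int) :
    (if 1 ≤ minlength then
      (if startnum > n ^ (minlength - 1).toNat then startnum else n ^ (minlength - 1).toNat)
      else startnum) =
      (if 1 ≤ minlength then max startnum (n ^ (minlength - 1).toNat) else startnum) := by
  split_ifs with hml hgt
  · exact (max_eq_left (by omega)).symm
  · exact (max_eq_right (by omega)).symm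
  · rfl

theorem pv_end_eq (n maxlength : Int) (endnum : Option Int) :
    (if 0 ≤ maxlength then
      (match endnum with
       | some e => if e < n ^ maxlength.toNat then e else n ^ maxlength.toNat
       | none => n ^ maxlength.toNat)
      else endnum.getD 0) =
      (if 0 ≤ maxlength then
        (match endnum with
         | some e => min e (n ^ maxlength.toNat)
         | none => n ^ maxlength.toNat)
        else endnum.getD 0) := by
  split_ifs with hml
  · cases endnum with
    | none => rfl
    | some e =>
      simp only
      split_ifs with hlt
      · exact (min_eq_left (by omega)).symm
      · exact (min_eq_right (by omega)).symm
  · rfl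

theorem pv_core (chars : List String) (s e : Int)
    (h : e ≤ s ∨ (2 ≤ chars.length ∧ 0 ≤ s)) :
    (PySem.List.pyRange s e 1).map (fun i => (i, pvGetChar chars i.toNat)) =
      (if e ≤ s then [] else
        pvLoop chars chars.length s e (pvToDigits chars.length s.toNat)
          ((pvToDigits chars.length s.toNat).map (pvCell chars))) := by
  by_cases hemp : e ≤ s
  · rw [if_pos hemp, PySem.List.pyRange_one]
    have h0 : (e - s).toNat = 0 := by omega
    simp [h0]
  · rw [if_neg hemp]
    rcases h with h | ⟨hn2, hs0⟩
    · exact absurd h hemp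
    · exact (pv_loop_eq chars hn2 e s hs0).symm

theorem pv_main (startnum : Int) (endnum : Option Int) (minlength : Int) (maxlength : Int) (chars : List String)
    (hpre : Pre_dict_builder startnum endnum minlength maxlength chars) :
    dict_builder startnum endnum minlength maxlength chars = dict_builder_alt startnum endnum minlength maxlength chars := by
  obtain ⟨h1, h2, h3⟩ := hpre
  unfold dict_builder dict_builder_alt
  simp only
  rw [pv_base_eq, pv_end_eq]
  apply pv_core
  by_cases hc : chars.length ≤ 1
  · left
    exact h3 (by exact_mod_cast hc)
  · right
    refine ⟨by omega, ?_⟩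
    split_ifs with hml
    · have hp : (0:Int) ≤ ((chars.length : Int)) ^ (minlength - 1).toNat :=
        pow_nonneg (Int.natCast_nonneg _) _
      have := le_max_right startnum (((chars.length : Int)) ^ (minlength - 1).toNat)
      omega
    · rcases h1 with h | ⟨_, h⟩ | ⟨hn1, _⟩
      · exact absurd h hml
      · omega
      · exfalso
        have : chars.length = 1 := by exact_mod_cast hn1
        omega

-- ===== VERDICT (by name: the statement is the Claim_ definition above) =====
theorem dict_builder_spec : Claim_equal_dict_builder := by
  intro startnum endnum minlength maxlength chars _hdom hpre
  unfold Spec_dict_builder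
  exact (pv_main startnum endnum minlength maxlength chars hpre).symm ▸ rfl
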